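-- pv_equiv track=rewrite | github.com/GreenHatHG/xueqiu | scripts/sync_to_turso_lib/sync.py | _order_tables
-- ===== SOURCE A (Python) =====
-- DEFAULT_TABLE_ORDER = [
--     "raw_records",
--     "merged_records",
--     "crawl_progress",
--     "talks_progress",
--     "crawl_checkpoints",
--     "posts",
--     "assertions",
--     "topic_package_run_progress",
-- ]
--
-- def _order_tables(tables: list[str]) -> list[str]:
--     ordered: list[str] = []
--     remaining = set(tables)
--     for name in DEFAULT_TABLE_ORDER:
--         if name in remaining:
--             ordered.append(name)
--             remaining.remove(name)
--     ordered.extend(sorted(remaining))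
--     return ordered
-- ===== SOURCE B (Python) =====
-- DEFAULT_TABLE_ORDER = [
--     "raw_records",
--     "merged_records",
--     "crawl_progress",
--     "talks_progress",
--     "crawl_checkpoints",
--     "posts",
--     "assertions",
--     "topic_package_run_progress",
-- ]
--
-- def _order_tables(tables: list[str]) -> list[str]:
--     priority = {name: i for i, name in enumerate(DEFAULT_TABLE_ORDER)}
--     return sorted(set(tables), key=lambda t: (priority.get(t, len(DEFAULT_TABLE_ORDER)), t))
-- ===== Notes on version B (the rewrite author's own statement) =====
-- stated objective: simpler
-- what changed: Replaces the explicit scan over the constant list with incremental set removal plus a separate sort of the leftovers by a single composite-key sort (priority index, name) over the deduplicated input.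
import Mathlib
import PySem

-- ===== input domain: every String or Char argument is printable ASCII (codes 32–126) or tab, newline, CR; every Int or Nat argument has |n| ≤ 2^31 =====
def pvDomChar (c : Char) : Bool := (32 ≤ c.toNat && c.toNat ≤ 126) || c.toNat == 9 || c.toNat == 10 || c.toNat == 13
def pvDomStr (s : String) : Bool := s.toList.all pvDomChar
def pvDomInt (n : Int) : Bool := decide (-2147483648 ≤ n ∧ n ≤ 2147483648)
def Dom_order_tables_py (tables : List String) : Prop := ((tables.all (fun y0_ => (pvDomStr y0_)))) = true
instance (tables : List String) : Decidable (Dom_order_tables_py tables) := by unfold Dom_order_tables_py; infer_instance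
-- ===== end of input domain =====

-- B replaces A's scan over the constant list plus separate sort of the leftovers
-- by a single composite-key sort (priority index, name) over the deduplicated input (objective: simpler).

-- shared module-level constant
def DEFAULT_TABLE_ORDER : List String :=
  ["raw_records", "merged_records", "crawl_progress", "talks_progress",
   "crawl_checkpoints", "posts", "assertions", "topic_package_run_progress"]

-- ===== PORT A =====
def order_tables_py (tables : List String) : List String :=
  -- ordered = []; remaining = set(tables); for name in DEFAULT_TABLE_ORDER: …
  let remaining : PySem.Set String := PySem.Set.ofList tables
  let st := DEFAULT_TABLE_ORDER.foldl
    (fun (st : List String × PySem.Set String) name =>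
      if PySem.Set.contains st.2 name then (st.1 ++ [name], PySem.Set.discard st.2 name)
      else st)
    (([] : List String), remaining)
  -- ordered.extend(sorted(remaining)); return ordered
  st.1 ++ PySem.List.sorted st.2 (fun x => x)

-- ===== PORT B =====
def order_tables_py_alt (tables : List String) : List String :=
  -- priority = {name: i for i, name in enumerate(DEFAULT_TABLE_ORDER)}
  let priority : PySem.Dict String Int :=
    PySem.Dict.ofList ((PySem.List.enumerate DEFAULT_TABLE_ORDER).map (fun p => (p.2, p.1)))
  -- sorted(set(tables), key=lambda t: (priority.get(t, len(DEFAULT_TABLE_ORDER)), t))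
  PySem.List.sorted2 (PySem.Set.ofList tables)
    (fun t => PySem.Dict.getD priority t (DEFAULT_TABLE_ORDER.length : Int))
    (fun t => t)

-- ===== PRECONDITION & SPEC =====
def Spec_order_tables_py (tables : List String) (out : List String) : Prop := out = order_tables_py_alt tables
instance (tables : List String) (out : List String) : Decidable (Spec_order_tables_py tables out) := by unfold Spec_order_tables_py; infer_instance

-- ===== CLAIM (what is proved, stated in full; the proofs are below) =====
def Claim_equal_order_tables_py : Prop := ∀ (tables : List String), Dom_order_tables_py tables → Spec_order_tables_py tables (order_tables_py tables)

-- ===== LEMMAS AND PROOFS =====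

-- the priority index of B, as a named function (proof helper)
def pvRank (t : String) : Int :=
  PySem.Dict.getD
    (PySem.Dict.ofList ((PySem.List.enumerate DEFAULT_TABLE_ORDER).map (fun p => (p.2, p.1))))
    t 8

-- B's composite sort key, into the lexicographic product order
def pvKey (t : String) : Lex (Int × String) := toLex (pvRank t, t)

lemma pvDict_eq :
    PySem.Dict.ofList ((PySem.List.enumerate DEFAULT_TABLE_ORDER).map (fun p => (p.2, p.1)))
      = PySem.Dict.mk [("raw_records", (0 : Int)), ("merged_records", 1), ("crawl_progress", 2),
          ("talks_progress", 3), ("crawl_checkpoints", 4), ("posts", 5), ("assertions", 6),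
          ("topic_package_run_progress", 7)] := by decide

lemma pvRank_of_not_mem {t : String} (h : t ∉ DEFAULT_TABLE_ORDER) : pvRank t = 8 := by
  simp only [DEFAULT_TABLE_ORDER, List.mem_cons, List.not_mem_nil, or_false, not_or] at h
  obtain ⟨h1, h2, h3, h4, h5, h6, h7, h8⟩ := h
  rw [pvRank, pvDict_eq]
  simp [PySem.Dict.getD, PySem.Dict.get?, List.find?,
    beq_eq_false_iff_ne.mpr (Ne.symm h1), beq_eq_false_iff_ne.mpr (Ne.symm h2),
    beq_eq_false_iff_ne.mpr (Ne.symm h3), beq_eq_false_iff_ne.mpr (Ne.symm h4),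
    beq_eq_false_iff_ne.mpr (Ne.symm h5), beq_eq_false_iff_ne.mpr (Ne.symm h6),
    beq_eq_false_iff_ne.mpr (Ne.symm h7), beq_eq_false_iff_ne.mpr (Ne.symm h8)]

lemma pvRank_lt_of_mem {t : String} (h : t ∈ DEFAULT_TABLE_ORDER) : pvRank t < 8 := by
  fin_cases h <;> decide

lemma pvRank_pairwise : DEFAULT_TABLE_ORDER.Pairwise (fun a b => pvRank a < pvRank b) := by
  decide

lemma pvKey_lt_of_rank_lt {a b : String} (h : pvRank a < pvRank b) : pvKey a < pvKey b := by
  simp [pvKey, Prod.Lex.lt_iff, h]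

-- B's sorted2 with the tuple key is sorted with the lexicographic key
lemma sorted2_eq_sorted_lex (xs : List String) (k : String → Int) :
    PySem.List.sorted2 xs k (fun t => t) = PySem.List.sorted xs (fun t => toLex (k t, t)) := by
  rw [PySem.List.sorted_eq_foldl_insertBy, PySem.List.sorted2]
  have hcmp : (fun a b : String => decide (k a < k b) || (!decide (k b < k a) && decide (a < b)))
      = (fun a b : String => decide (toLex (k a, a) < toLex (k b, b))) := by
    funext a b
    rcases lt_trichotomy (k a) (k b) with h | h | h
    · simp [Prod.Lex.lt_iff, h]
    · simp [Prod.Lex.lt_iff, h]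
    · simp [Prod.Lex.lt_iff, h, lt_asymm h, h.ne']
  simp only [hcmp, Bool.false_eq_true, if_false]

-- invariant of A's loop over the preferred-order list
lemma foldA_spec (d : List String) (hd : d.Nodup) :
    ∀ (acc : List String) (s : List String), s.Nodup →
    d.foldl (fun (st : List String × PySem.Set String) name =>
        if PySem.Set.contains st.2 name then (st.1 ++ [name], PySem.Set.discard st.2 name)
        else st) (acc, s)
      = (acc ++ d.filter (fun n => PySem.Set.contains s n),
         s.filter (fun x => decide (x ∉ d))) := by
  induction d with
  | nil => intro acc s _; simp
  | cons n d ih =>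
    intro acc s hs
    obtain ⟨hnd, hd'⟩ := List.nodup_cons.mp hd
    by_cases hn : n ∈ s
    · have hc : PySem.Set.contains s n = true := by
        simp [PySem.Set.contains, hn]
      have hs' : (PySem.Set.discard s n).Nodup := hs.filter _
      rw [List.foldl_cons]
      simp only [hc]
      rw [if_pos trivial]
      rw [ih hd' (acc ++ [n]) (PySem.Set.discard s n) hs']
      simp only [Prod.mk.injEq]
      refine ⟨?_, ?_⟩
      · have hfil : List.filter (fun m => (PySem.Set.discard s n).contains m) d
            = List.filter (fun m => PySem.Set.contains s m) d := by
          apply List.filter_congr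
          intro m hm
          have hmn : m ≠ n := fun h => hnd (h ▸ hm)
          simp [PySem.Set.contains, PySem.Set.discard, List.mem_filter, hmn]
        rw [hfil, List.filter_cons, hc, if_pos rfl]
        simp
      · rw [show PySem.Set.discard s n = s.filter (fun y => !(y == n)) from rfl,
            List.filter_filter]
        apply List.filter_congr
        intro x _
        by_cases hxn : x = n <;> simp [hxn, hnd]
    · have hc : PySem.Set.contains s n = false := by
        simp [PySem.Set.contains, hn]
      rw [List.foldl_cons]
      simp only [hc, Bool.false_eq_true]
      rw [if_neg not_false]
      rw [ih hd' acc s hs]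
      simp only [Prod.mk.injEq]
      refine ⟨?_, ?_⟩
      · rw [List.filter_cons, hc, if_neg Bool.false_ne_true]
      · apply List.filter_congr
        intro x hx
        have hxn : x ≠ n := fun h => hn (h ▸ hx)
        simp [hxn]

set_option maxHeartbeats 1000000 in
lemma main_eq (tables : List String) :
    order_tables_py tables = order_tables_py_alt tables := by
  have hkey : (fun t => toLex (PySem.Dict.getD
      (PySem.Dict.ofList ((PySem.List.enumerate DEFAULT_TABLE_ORDER).map (fun p => (p.2, p.1))))
      t (DEFAULT_TABLE_ORDER.length : Int), t)) = pvKey := by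
    funext t; rfl
  rw [order_tables_py_alt]
  rw [sorted2_eq_sorted_lex]
  rw [hkey]
  set s : List String := PySem.Set.ofList tables with hsdef
  have hs : s.Nodup := PySem.Set.nodup_ofList tables
  rw [order_tables_py]
  rw [foldA_spec DEFAULT_TABLE_ORDER (by decide) [] s hs]
  simp only [List.nil_append]
  -- name the two halves of A's output
  set f1 : List String := DEFAULT_TABLE_ORDER.filter (fun n => PySem.Set.contains s n) with hf1
  set r : List String := s.filter (fun x => decide (x ∉ DEFAULT_TABLE_ORDER)) with hr
  set f2 : List String := PySem.List.sorted r (fun x => x) with hf2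
  symm
  apply PySem.List.sorted_eq_of_perm_of_pairwise_lt
  · -- permutation
    have h1 : f1.Perm (s.filter (fun x => decide (x ∈ DEFAULT_TABLE_ORDER))) := by
      rw [List.perm_ext_iff_of_nodup (List.Nodup.filter _ (by decide)) (hs.filter _)]
      intro a
      simp [List.mem_filter, PySem.Set.contains, and_comm]
    have h2 : f2.Perm r := PySem.List.sorted_perm r (fun x => x) false
    refine (h1.append h2).trans ?_
    have h3 := List.filter_append_perm (fun x => decide (x ∈ DEFAULT_TABLE_ORDER)) s
    simpa [hr, decide_not] using h3
  · -- strictly increasing in pvKey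
    rw [List.pairwise_append]
    refine ⟨?_, ?_, ?_⟩
    · exact (pvRank_pairwise.sublist List.filter_sublist).imp pvKey_lt_of_rank_lt
    · have hle : f2.Pairwise (fun a b : String => a ≤ b) := by
        simpa using PySem.List.sorted_pairwise r (fun x => x)
      have hnd : f2.Nodup := (PySem.List.sorted_perm r (fun x => x) false).nodup_iff.mpr (hs.filter _)
      have hlt : f2.Pairwise (fun a b : String => a < b) :=
        (hle.and hnd).imp (fun h => lt_of_le_of_ne h.1 h.2)
      have hmem : ∀ x ∈ f2, pvRank x = 8 := by
        intro x hx
        have : x ∈ r := (PySem.List.sorted_perm r (fun x => x) false).mem_iff.mp hx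
        have : x ∉ DEFAULT_TABLE_ORDER := by
          rw [hr] at this
          simpa using (List.mem_filter.mp this).2
        exact pvRank_of_not_mem this
      refine List.Pairwise.imp_of_mem ?_ hlt
      intro a b ha hb hab
      simp [pvKey, Prod.Lex.lt_iff, hmem a ha, hmem b hb, hab]
    · intro a ha b hb
      have ha' : a ∈ DEFAULT_TABLE_ORDER := List.mem_of_mem_filter ha
      have hb8 : pvRank b = 8 := by
        have : b ∈ r := (PySem.List.sorted_perm r (fun x => x) false).mem_iff.mp hb
        have : b ∉ DEFAULT_TABLE_ORDER := by
          rw [hr] at this; simpa using (List.mem_filter.mp this).2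
        exact pvRank_of_not_mem this
      exact pvKey_lt_of_rank_lt (by rw [hb8]; exact pvRank_lt_of_mem ha')

-- ===== VERDICT (by name: the statement is the Claim_ definition above) =====
set_option maxHeartbeats 1000000 in
theorem order_tables_py_spec : Claim_equal_order_tables_py := by
  intro tables _
  unfold Spec_order_tables_py
  exact main_eq tables
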